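-- pv_equiv track=rewrite | github.com/julien6/omarl_experiments | prahom_wrapper/role_clustering.py | find_two_subsequences_with_best_lcs
-- ===== SOURCE A (Python) =====
-- def longest_common_subsequence(s1, s2):
--     m = len(s1)
--     n = len(s2)
--     dp = [[0] * (n + 1) for _ in range(m + 1)]
--
--     for i in range(1, m + 1):
--         for j in range(1, n + 1):
--             if s1[i - 1] == s2[j - 1]:
--                 dp[i][j] = dp[i - 1][j - 1] + 1
--             else:
--                 dp[i][j] = max(dp[i - 1][j], dp[i][j - 1])
--
--     # Reconstruction de la sous-séquence commune
--     i, j = m, n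
--     common_sequence = []
--     while i > 0 and j > 0:
--         if s1[i - 1] == s2[j - 1]:
--             common_sequence.append(s1[i - 1])
--             i -= 1
--             j -= 1
--         elif dp[i - 1][j] > dp[i][j - 1]:
--             i -= 1
--         else:
--             j -= 1
--
--     return common_sequence[::-1]
--
-- def find_two_subsequences_with_best_lcs(sequences):
--
--     max_lcs = []
--     seq1 = []
--     seq2 = []
--     for i, s1 in enumerate(sequences):
--         for j, s2 in enumerate(sequences):
--             if i != j:
--                 lcs = longest_common_subsequence(s1, s2)
--                 if (len(lcs) > len(max_lcs)):
--                     max_lcs = lcs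
--                     seq1 = s1
--                     seq2 = s2
--
--     return max_lcs, seq1, seq2
-- ===== SOURCE B (Python) =====
-- def _lcs_list(s1, s2):
--     # DP cell carries the subsequence itself; forward tie-break (strict '>' for the
--     # up-cell, else the left-cell) reproduces A's backward reconstruction exactly.
--     n = len(s2)
--     prev = [[] for _ in range(n + 1)]
--     for x in s1:
--         cur = [[]]
--         for j in range(1, n + 1):
--             if x == s2[j - 1]:
--                 cur.append(prev[j - 1] + [x])
--             elif len(prev[j]) > len(cur[j - 1]):
--                 cur.append(prev[j])
--             else:
--                 cur.append(cur[j - 1])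
--         prev = cur
--     return prev[n]
--
-- def find_two_subsequences_with_best_lcs(sequences):
--     max_lcs = []
--     seq1 = []
--     seq2 = []
--     for i, s1 in enumerate(sequences):
--         for j, s2 in enumerate(sequences):
--             if i != j:
--                 lcs = _lcs_list(s1, s2)
--                 if len(lcs) > len(max_lcs):
--                     max_lcs = lcs
--                     seq1 = s1
--                     seq2 = s2
--     return max_lcs, seq1, seq2
-- ===== Notes on version B (the rewrite author's own statement) =====
-- stated objective: simpler
-- what changed: The LCS helper's DP cells carry the subsequence itself (forward, strict-'>' tie-break reproducing A's backward walk), so the length table, its full allocation and the whole backward reconstruction pass disappear and only the previous row is kept.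
import Mathlib
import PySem

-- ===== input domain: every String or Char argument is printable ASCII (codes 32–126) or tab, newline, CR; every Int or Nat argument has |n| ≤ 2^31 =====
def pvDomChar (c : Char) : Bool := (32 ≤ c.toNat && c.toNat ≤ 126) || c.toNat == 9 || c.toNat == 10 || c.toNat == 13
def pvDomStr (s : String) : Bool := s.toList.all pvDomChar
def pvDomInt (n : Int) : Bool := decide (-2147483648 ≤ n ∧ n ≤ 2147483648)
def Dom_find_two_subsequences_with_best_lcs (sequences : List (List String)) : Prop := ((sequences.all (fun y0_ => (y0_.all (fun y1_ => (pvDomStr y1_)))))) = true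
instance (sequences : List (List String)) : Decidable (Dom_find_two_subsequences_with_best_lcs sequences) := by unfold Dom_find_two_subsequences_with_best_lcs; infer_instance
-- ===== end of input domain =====

-- B replaces A's length-table-plus-backward-reconstruction LCS helper by a single forward
-- DP whose cells carry the subsequence itself (objective: simpler — no reconstruction pass).

-- ===== PORT A =====
-- inner dp-fill loop (j = 1..n) of longest_common_subsequence: state = (remaining s2,
-- remaining previous-row cells p_j.., diag = dp[i-1][j-1], left = dp[i][j-1])
def lcsGoA (x : String) : List String → List Int → Int → Int → List Int
  | [], _, _, _ => []
  | _ :: _, [], _, _ => []  -- unreachable: prev row always has one more cell than remaining s2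
  | y :: ys, pj :: ptail, diag, left =>
      let c := if x = y then diag + 1 else max pj left
      c :: lcsGoA x ys ptail pj c

-- one pass of the outer dp-fill loop: compute row i of dp from row i-1 (dp[i][0] stays 0)
def lcsRowA (x : String) (s2 : List String) : List Int → List Int
  | [] => []  -- unreachable
  | p0 :: ptail => 0 :: lcsGoA x s2 ptail p0 0

-- the full dp table (list of rows 0..m), filled row by row as Python's nested loops do
def lcsRowsA (s2 : List String) : List String → List Int → List (List Int)
  | [], prev => [prev]
  | x :: xs, prev => prev :: lcsRowsA s2 xs (lcsRowA x s2 prev)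

def dpGet2 (dp : List (List Int)) (i j : Nat) : Int := (dp.getD i []).getD j 0  -- dp[i][j]; always in range here

-- Python's while-loop; it builds common_sequence in append order (last match first),
-- so the structural recursion conses in that same order
def lcsBackA (s1 s2 : List String) (dp : List (List Int)) : Nat → Nat → List String
  | 0, _ => []
  | _ + 1, 0 => []
  | i + 1, j + 1 =>
      if s1.getD i "" = s2.getD j "" then
        s1.getD i "" :: lcsBackA s1 s2 dp i j
      else if dpGet2 dp i (j + 1) > dpGet2 dp (i + 1) j then
        lcsBackA s1 s2 dp i (j + 1)
      else
        lcsBackA s1 s2 dp (i + 1) j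
  termination_by i j => i + j

def longest_common_subsequence (s1 s2 : List String) : List String :=
  let dp := lcsRowsA s2 s1 (List.replicate (s2.length + 1) (0 : Int))
  (lcsBackA s1 s2 dp s1.length s2.length).reverse  -- common_sequence[::-1]

def find_two_subsequences_with_best_lcs (sequences : List (List String)) : List String × List String × List String :=
  (PySem.List.enumerate sequences 0).foldl (fun st p =>
    (PySem.List.enumerate sequences 0).foldl (fun st2 q =>
      if p.1 ≠ q.1 then
        let lcs := longest_common_subsequence p.2 q.2
        if lcs.length > st2.1.length then (lcs, p.2, q.2) else st2
      else st2) st)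
    ([], [], [])

-- ===== PORT B =====
-- inner dp-fill loop of _lcs_list: cells carry the subsequence; same state shape as the
-- Python loop (remaining s2, remaining prev cells, prev[j-1] and cur[j-1])
def lcsGoB (x : String) : List String → List (List String) → List String → List String → List (List String)
  | [], _, _, _ => []
  | _ :: _, [], _, _ => []  -- unreachable
  | y :: ys, pj :: ptail, diag, left =>
      let c := if x = y then diag ++ [x]
               else if pj.length > left.length then pj else left
      c :: lcsGoB x ys ptail pj c

def lcsRowB (x : String) (s2 : List String) : List (List String) → List (List String)
  | [] => []  -- unreachable
  | p0 :: ptail => [] :: lcsGoB x s2 ptail p0 []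

-- the 'for x in s1' loop: only prev is kept
def lcsPrevB (s2 : List String) : List String → List (List String) → List (List String)
  | [], prev => prev
  | x :: xs, prev => lcsPrevB s2 xs (lcsRowB x s2 prev)

def lcsListB (s1 s2 : List String) : List String :=
  (lcsPrevB s2 s1 (List.replicate (s2.length + 1) ([] : List String))).getD s2.length []

def find_two_subsequences_with_best_lcs_alt (sequences : List (List String)) : List String × List String × List String :=
  (PySem.List.enumerate sequences 0).foldl (fun st p =>
    (PySem.List.enumerate sequences 0).foldl (fun st2 q =>
      if p.1 ≠ q.1 then
        let lcs := lcsListB p.2 q.2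
        if lcs.length > st2.1.length then (lcs, p.2, q.2) else st2
      else st2) st)
    ([], [], [])

-- ===== PRECONDITION & SPEC =====
def Spec_find_two_subsequences_with_best_lcs (sequences : List (List String)) (out : List String × List String × List String) : Prop := out = find_two_subsequences_with_best_lcs_alt sequences
instance (sequences : List (List String)) (out : List String × List String × List String) : Decidable (Spec_find_two_subsequences_with_best_lcs sequences out) := by unfold Spec_find_two_subsequences_with_best_lcs; infer_instance

-- ===== CLAIM (what is proved, stated in full; the proofs are below) =====
def Claim_equal_find_two_subsequences_with_best_lcs : Prop := ∀ (sequences : List (List String)), Dom_find_two_subsequences_with_best_lcs sequences → Spec_find_two_subsequences_with_best_lcs sequences (find_two_subsequences_with_best_lcs sequences)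

-- ===== LEMMAS AND PROOFS =====

-- the common specification: G s1 s2 i j = the LCS (with both programs' tie-break) of the
-- first i elements of s1 and the first j elements of s2
def G (s1 s2 : List String) : Nat → Nat → List String
  | 0, _ => []
  | _ + 1, 0 => []
  | i + 1, j + 1 =>
      if s1.getD i "" = s2.getD j "" then
        G s1 s2 i j ++ [s1.getD i ""]
      else if (G s1 s2 i (j + 1)).length > (G s1 s2 (i + 1) j).length then
        G s1 s2 i (j + 1)
      else
        G s1 s2 (i + 1) j
  termination_by i j => i + j

lemma G_zero_left (s1 s2 : List String) (j : Nat) : G s1 s2 0 j = [] := by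
  cases j <;> simp [G]

lemma G_zero_right (s1 s2 : List String) (i : Nat) : G s1 s2 i 0 = [] := by
  cases i <;> simp [G]

-- row i of the subsequence dp table, as a list
def Rw (s1 s2 : List String) (i : Nat) : List (List String) :=
  (List.range (s2.length + 1)).map (G s1 s2 i)

lemma lcsGoB_spec (s1 s2 : List String) (i : Nat) :
    ∀ (k j0 : Nat), j0 + k = s2.length →
      lcsGoB (s1.getD i "") (s2.drop j0) ((List.range' (j0 + 1) k).map (G s1 s2 i))
        (G s1 s2 i j0) (G s1 s2 (i + 1) j0)
      = (List.range' (j0 + 1) k).map (G s1 s2 (i + 1)) := by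
  intro k
  induction k with
  | zero =>
    intro j0 h
    have : s2.drop j0 = [] := by
      have : j0 = s2.length := by omega
      simp [this]
    simp [this, lcsGoB]
  | succ k ih =>
    intro j0 h
    have hj0 : j0 < s2.length := by omega
    have hdrop : s2.drop j0 = s2[j0] :: s2.drop (j0 + 1) := List.drop_eq_getElem_cons hj0
    have hget : s2.getD j0 "" = s2[j0] := List.getD_eq_getElem s2 "" hj0
    rw [hdrop, List.range'_succ, List.map_cons, List.map_cons, lcsGoB]
    have hc : (if s1.getD i "" = s2[j0] then G s1 s2 i j0 ++ [s1.getD i ""]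
               else if (G s1 s2 i (j0 + 1)).length > (G s1 s2 (i + 1) j0).length then
                 G s1 s2 i (j0 + 1) else G s1 s2 (i + 1) j0)
             = G s1 s2 (i + 1) (j0 + 1) := by
      rw [← hget]; rw [G]
    simp only [hc]
    have := ih (j0 + 1) (by omega)
    rw [this]

lemma lcsRowB_spec (s1 s2 : List String) (i : Nat) :
    lcsRowB (s1.getD i "") s2 (Rw s1 s2 i) = Rw s1 s2 (i + 1) := by
  unfold Rw
  have hr : List.range (s2.length + 1) = 0 :: List.range' 1 s2.length := by
    rw [List.range_eq_range', List.range'_succ]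
  rw [hr, List.map_cons, List.map_cons, lcsRowB]
  have hgo := lcsGoB_spec s1 s2 i s2.length 0 (by omega)
  simp only [List.drop_zero, Nat.zero_add] at hgo
  simp only [G_zero_right] at hgo ⊢
  exact congrArg _ hgo

lemma Rw_zero (s1 s2 : List String) :
    Rw s1 s2 0 = List.replicate (s2.length + 1) ([] : List String) := by
  unfold Rw
  rw [List.eq_replicate_iff]
  constructor
  · simp
  · intro b hb
    simp only [List.mem_map] at hb
    obtain ⟨a, _, rfl⟩ := hb
    exact G_zero_left s1 s2 a

lemma lcsPrevB_spec (s2 : List String) :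
    ∀ (xs s1 : List String) (i : Nat), s1.drop i = xs →
      lcsPrevB s2 xs (Rw s1 s2 i) = Rw s1 s2 (i + xs.length) := by
  intro xs
  induction xs with
  | nil => intro s1 i _; simp [lcsPrevB]
  | cons x xs ih =>
    intro s1 i hx
    have hi : i < s1.length := by
      by_contra h
      rw [List.drop_eq_nil_of_le (by omega)] at hx
      simp at hx
    have h2 := (List.drop_eq_getElem_cons hi (l := s1)).symm.trans hx
    obtain ⟨hx1, hx2⟩ := List.cons_eq_cons.mp h2
    have hxeq : x = s1.getD i "" := by
      rw [List.getD_eq_getElem s1 "" hi]; exact hx1.symm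
    rw [lcsPrevB, hxeq, lcsRowB_spec, ih s1 (i + 1) hx2]
    congr 1
    simp [List.length_cons]
    omega

lemma lcsListB_eq_G (s1 s2 : List String) :
    lcsListB s1 s2 = G s1 s2 s1.length s2.length := by
  unfold lcsListB
  rw [← Rw_zero s1 s2]
  rw [lcsPrevB_spec s2 s1 s1 0 (by simp)]
  unfold Rw
  rw [List.getD_eq_getElem _ _ (by simp)]
  simp

-- A's dp cells are the lengths of B's cells
def lenI (l : List String) : Int := l.length

lemma lcsGoA_map (x : String) :
    ∀ (ys : List String) (p : List (List String)) (diag left : List String),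
      lcsGoA x ys (p.map lenI) (lenI diag) (lenI left)
      = (lcsGoB x ys p diag left).map lenI := by
  intro ys
  induction ys with
  | nil => intro p diag left; simp [lcsGoA, lcsGoB]
  | cons y ys ih =>
    intro p diag left
    cases p with
    | nil => simp [lcsGoA, lcsGoB]
    | cons pj ptail =>
      rw [List.map_cons, lcsGoA, lcsGoB]
      have hc : (if x = y then lenI diag + 1 else max (lenI pj) (lenI left))
          = lenI (if x = y then diag ++ [x] else if pj.length > left.length then pj else left) := by
        by_cases hxy : x = y
        · simp [hxy, lenI]
        · simp only [hxy, if_false, lenI]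
          by_cases hl : pj.length > left.length
          · simp [hl]; omega
          · simp [hl]; omega
      simp only [hc]
      rw [List.map_cons, ih]

lemma lcsRowA_map (x : String) (s2 : List String) (prev : List (List String)) :
    lcsRowA x s2 (prev.map lenI) = (lcsRowB x s2 prev).map lenI := by
  cases prev with
  | nil => simp [lcsRowA, lcsRowB]
  | cons p0 ptail =>
    rw [List.map_cons, lcsRowA, lcsRowB, List.map_cons]
    have h0 : (0 : Int) = lenI [] := by simp [lenI]
    rw [show (0 : Int) = lenI ([] : List String) from rfl]
    rw [lcsGoA_map]

-- the rows A collects are rows 0..m of the spec table, mapped through lenI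
lemma lcsRowsA_spec (s1 s2 : List String) :
    ∀ (xs : List String) (i : Nat), s1.drop i = xs →
      lcsRowsA s2 xs ((Rw s1 s2 i).map lenI)
      = (List.range' i (xs.length + 1)).map (fun t => (Rw s1 s2 t).map lenI) := by
  intro xs
  induction xs with
  | nil =>
    intro i _
    simp [lcsRowsA, List.range'_succ]
  | cons x xs ih =>
    intro i hx
    have hi : i < s1.length := by
      by_contra h
      rw [List.drop_eq_nil_of_le (by omega)] at hx
      simp at hx
    have h2 := (List.drop_eq_getElem_cons hi (l := s1)).symm.trans hx
    obtain ⟨hx1, hx2⟩ := List.cons_eq_cons.mp h2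
    have hxeq : x = s1.getD i "" := by
      rw [List.getD_eq_getElem s1 "" hi]; exact hx1.symm
    rw [lcsRowsA, hxeq, lcsRowA_map, lcsRowB_spec]
    rw [ih (i + 1) hx2]
    simp only [List.length_cons, List.range'_succ, List.map_cons]

lemma dpA_get2 (s1 s2 : List String) (i j : Nat) (hi : i ≤ s1.length) (hj : j ≤ s2.length) :
    dpGet2 (lcsRowsA s2 s1 (List.replicate (s2.length + 1) (0 : Int))) i j
    = ((G s1 s2 i j).length : Int) := by
  have hinit : List.replicate (s2.length + 1) (0 : Int) = (Rw s1 s2 0).map lenI := by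
    rw [Rw_zero]
    rw [List.map_replicate]
    rfl
  rw [hinit, lcsRowsA_spec s1 s2 s1 0 (by simp)]
  unfold dpGet2
  have h1 : i < (List.map (fun t => List.map lenI (Rw s1 s2 t)) (List.range' 0 (s1.length + 1))).length := by
    simp only [List.length_map, List.length_range']; omega
  rw [List.getD_eq_getElem _ _ h1, List.getElem_map, List.getElem_range']
  simp only [Nat.zero_add, Nat.one_mul]
  have h2 : j < (List.map lenI (Rw s1 s2 i)).length := by
    simp only [List.length_map, Rw, List.length_range]; omega
  rw [List.getD_eq_getElem _ _ h2]
  simp [Rw, lenI]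

lemma lcsBackA_spec (s1 s2 : List String) :
    ∀ (i j : Nat), i ≤ s1.length → j ≤ s2.length →
      lcsBackA s1 s2 (lcsRowsA s2 s1 (List.replicate (s2.length + 1) (0 : Int))) i j
      = (G s1 s2 i j).reverse := by
  intro i
  induction i with
  | zero => intro j _ _; rw [lcsBackA, G_zero_left]; rfl
  | succ i ihi =>
    intro j
    induction j with
    | zero => intro _ _; rw [lcsBackA, G_zero_right]; rfl
    | succ j ihj =>
      intro hi hj
      rw [lcsBackA, G]
      by_cases hxy : s1.getD i "" = s2.getD j ""
      · simp only [hxy, if_true]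
        rw [ihi j (by omega) (by omega)]
        simp
      · simp only [hxy, if_false]
        rw [dpA_get2 s1 s2 i (j + 1) (by omega) hj,
            dpA_get2 s1 s2 (i + 1) j hi (by omega)]
        by_cases hgt : ((G s1 s2 i (j + 1)).length : Int) > ((G s1 s2 (i + 1) j).length : Int)
        · rw [if_pos hgt, if_pos (by exact_mod_cast hgt)]
          exact ihi (j + 1) (by omega) hj
        · rw [if_neg hgt, if_neg (by intro h; exact hgt (by exact_mod_cast h))]
          exact ihj hi (by omega)

lemma lcs_eq (s1 s2 : List String) :
    longest_common_subsequence s1 s2 = lcsListB s1 s2 := by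
  have hdef : longest_common_subsequence s1 s2
      = (lcsBackA s1 s2 (lcsRowsA s2 s1 (List.replicate (s2.length + 1) (0 : Int))) s1.length s2.length).reverse := rfl
  rw [hdef, lcsBackA_spec s1 s2 s1.length s2.length le_rfl le_rfl]
  rw [List.reverse_reverse, lcsListB_eq_G]

-- ===== VERDICT (by name: the statement is the Claim_ definition above) =====
theorem find_two_subsequences_with_best_lcs_spec : Claim_equal_find_two_subsequences_with_best_lcs := by
  intro sequences _
  unfold Spec_find_two_subsequences_with_best_lcs
  unfold find_two_subsequences_with_best_lcs find_two_subsequences_with_best_lcs_alt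
  simp only [lcs_eq]
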